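-- pv_equiv track=rewrite | github.com/AnnPlugn/exam24palch | 48.py | interleave_lists
-- ===== SOURCE A (Python) =====
-- def interleave_lists(listlist):
--     result = []  # Список, содержащий поочередно элементы каждого из вложенных списков
--     remaining = []  # Список из всех элементов, не вошедших в составленный список
--
--     i = 0
--     while True:
--         has_elements = False  # Флаг, показывающий, есть ли ещё элементы в каком-либо из вложенных списков
--         for sublist in listlist:
--             if i < len(sublist):  # Если вложенный список ещё содержит элементы
--                 result.append(sublist[i])  # Добавляем очередной элемент в результат
--                 has_elements = True  # Устанавливаем флаг наличия элементов
--             else: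
--                 remaining += sublist[i:]  # Добавляем оставшиеся элементы в список remaining
--         if not has_elements:  # Если ни в одном из вложенных списков не осталось элементов
--             break  # Прекращаем цикл
--         i += 1
--
--     return result, remaining
-- ===== SOURCE B (Python) =====
-- def interleave_lists(listlist):
--     result = []
--     active = [s for s in listlist if s]
--     while active:
--         nxt = []
--         for s in active:
--             result.append(s[0])
--             t = s[1:]
--             if t:
--                 nxt.append(t)
--         active = nxt
--     return result, []
-- ===== Notes on version B (the rewrite author's own statement) =====
-- stated objective: alternative
-- what changed: Instead of A's unbounded while-True over column indices that rescans all L sublists at every column (appending empty slices to remaining), B keeps a shrinking list of still-active sublists, pops their heads column by column, drops exhausted ones, and returns an always-empty remaining directly.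
import Mathlib
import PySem

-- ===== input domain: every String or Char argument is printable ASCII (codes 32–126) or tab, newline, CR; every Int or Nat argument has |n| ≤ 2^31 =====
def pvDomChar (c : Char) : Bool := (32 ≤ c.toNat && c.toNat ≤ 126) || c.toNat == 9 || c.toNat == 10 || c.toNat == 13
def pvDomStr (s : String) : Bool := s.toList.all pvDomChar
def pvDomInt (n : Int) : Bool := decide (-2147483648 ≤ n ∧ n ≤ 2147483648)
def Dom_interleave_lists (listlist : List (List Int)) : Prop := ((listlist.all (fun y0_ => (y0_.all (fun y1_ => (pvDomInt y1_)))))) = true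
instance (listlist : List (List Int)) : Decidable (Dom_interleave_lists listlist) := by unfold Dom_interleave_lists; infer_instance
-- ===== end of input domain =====

-- B replaces A's per-column rescan of every sublist with a shrinking active-sublist list; return value only (A mutates nothing observable).

-- ===== PORT A =====
-- one pass of A's inner `for sublist in listlist` loop; state = (result, remaining, has_elements)
-- `sublist[i]` is read under the check `i < len(sublist)`, so `s.getD i 0` is exact;
-- `sublist[i:]` with i ≥ len(sublist) is `s.drop i` (exact there).
def aStep (i : Nat) (acc : List Int × List Int × Bool) (s : List Int) : List Int × List Int × Bool :=
  if i < s.length then (acc.1 ++ [s.getD i 0], acc.2.1, true)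
  else (acc.1, acc.2.1 ++ s.drop i, acc.2.2)

-- the whole `for sublist in listlist` pass at column i
def aPass (listlist : List (List Int)) (i : Nat) (result remaining : List Int) : List Int × List Int × Bool :=
  listlist.foldl (aStep i) (result, remaining, false)

def aMaxLen (ls : List (List Int)) : Nat := ls.foldl (fun m s => max m s.length) 0

theorem aStep_has (i : Nat) (ls : List (List Int)) (acc : List Int × List Int × Bool) :
    (ls.foldl (aStep i) acc).2.2 = (acc.2.2 || ls.any (fun s => decide (i < s.length))) := by
  induction ls generalizing acc with
  | nil => simp
  | cons s t ih =>
    simp only [List.foldl_cons, List.any_cons, ih]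
    by_cases h : i < s.length <;> simp [aStep, h]

theorem foldl_max_ge_init (t : List (List Int)) (m : Nat) :
    m ≤ t.foldl (fun m s => max m s.length) m := by
  induction t generalizing m with
  | nil => simp
  | cons a t ih => exact le_trans (le_max_left _ _) (ih _)

theorem aMaxLen_ge' (s : List Int) (ls : List (List Int)) :
    ∀ (m : Nat), s ∈ ls → s.length ≤ ls.foldl (fun m t => max m t.length) m := by
  induction ls with
  | nil => intro m hs; cases hs
  | cons a t ih =>
    intro m hs
    rcases List.mem_cons.mp hs with h | h
    · subst h
      exact le_trans (le_max_right m s.length) (foldl_max_ge_init t _)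
    · exact ih _ h

theorem aMaxLen_ge (ls : List (List Int)) (s : List Int) (hs : s ∈ ls) : s.length ≤ aMaxLen ls :=
  aMaxLen_ge' s ls 0 hs

-- the `while True` loop of A
def aLoop (listlist : List (List Int)) (i : Nat) (result remaining : List Int) : List Int × List Int :=
  if h : (aPass listlist i result remaining).2.2 = true then
    aLoop listlist (i + 1) (aPass listlist i result remaining).1 (aPass listlist i result remaining).2.1
  else ((aPass listlist i result remaining).1, (aPass listlist i result remaining).2.1)
termination_by aMaxLen listlist - i
decreasing_by
  unfold aPass at h
  rw [aStep_has] at h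
  simp only [Bool.false_or, List.any_eq_true, decide_eq_true_eq] at h
  obtain ⟨s, hs, hlt⟩ := h
  have := aMaxLen_ge listlist s hs
  omega

def interleave_lists (listlist : List (List Int)) : List Int × List Int :=
  aLoop listlist 0 [] []

-- ===== PORT B =====
-- one pass of B's inner `for s in active` loop; state = (result, nxt)
def bStep (acc : List Int × List (List Int)) (s : List Int) : List Int × List (List Int) :=
  let t := s.drop 1
  (acc.1 ++ [s.headD 0], if t.isEmpty then acc.2 else acc.2 ++ [t])

-- the whole `for s in active` pass
def bPass (active : List (List Int)) (result : List Int) : List Int × List (List Int) :=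
  active.foldl bStep (result, [])

def bMeasure (ls : List (List Int)) : Nat := (ls.map (fun s => s.length + 1)).sum

theorem bStep_eq (acc : List Int × List (List Int)) (s : List Int) :
    bStep acc s = (acc.1 ++ [s.head?.getD 0], if s.tail = [] then acc.2 else acc.2 ++ [s.tail]) := by
  simp [bStep]

theorem bStep_measure (act : List (List Int)) (res : List Int) (acc2 : List (List Int)) :
    bMeasure ((act.foldl bStep (res, acc2)).2)
      = bMeasure acc2 + (act.map (fun s => if s.tail = [] then 0 else s.length)).sum := by
  induction act generalizing res acc2 with
  | nil => simp
  | cons s t ih =>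
    rw [List.foldl_cons, bStep_eq, List.map_cons, List.sum_cons]
    dsimp only
    by_cases h : s.tail = []
    · rw [if_pos h, ih, if_pos h]
      omega
    · rw [if_neg h, ih, if_neg h]
      have hlen : 2 ≤ s.length := by
        rcases s with _ | ⟨a, s'⟩
        · simp at h
        · rcases s' with _ | ⟨b, s''⟩
          · simp at h
          · simp
      have hm : bMeasure (acc2 ++ [s.tail]) = bMeasure acc2 + s.length := by
        simp [bMeasure]
        omega
      omega

-- the `while active` loop of B
def bLoop (active : List (List Int)) (result : List Int) : List Int × List Int :=
  if active.isEmpty then (result, [])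
  else bLoop (bPass active result).2 (bPass active result).1
termination_by bMeasure active
decreasing_by
  unfold bPass
  rw [bStep_measure]
  have h0 : bMeasure ([] : List (List Int)) = 0 := rfl
  have h1 : ((active.map (fun s => if s.tail = [] then 0 else s.length)).sum)
      ≤ (active.map (fun s => s.length)).sum := by
    apply List.sum_le_sum
    intro s _
    split <;> omega
  have h2 : (active.map (fun s => s.length)).sum < bMeasure active := by
    unfold bMeasure
    rcases active with _ | ⟨a, t⟩
    · simp_all
    · simp only [List.map_cons, List.sum_cons]
      have : (t.map (fun s => s.length)).sum ≤ (t.map (fun s => s.length + 1)).sum := by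
        apply List.sum_le_sum; intro s hs; omega
      omega
  omega

def interleave_lists_alt (listlist : List (List Int)) : List Int × List Int :=
  bLoop (listlist.filter (fun s => !s.isEmpty)) []

-- ===== PRECONDITION & SPEC =====
def Spec_interleave_lists (listlist : List (List Int)) (out : List Int × List Int) : Prop := out = interleave_lists_alt listlist
instance (listlist : List (List Int)) (out : List Int × List Int) : Decidable (Spec_interleave_lists listlist out) := by unfold Spec_interleave_lists; infer_instance

-- ===== CLAIM (what is proved, stated in full; the proofs are below) =====
def Claim_equal_interleave_lists : Prop := ∀ (listlist : List (List Int)), Dom_interleave_lists listlist → Spec_interleave_lists listlist (interleave_lists listlist)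

-- ===== LEMMAS AND PROOFS =====

-- the still-active sublists after i columns, in original order
def actAt (i : Nat) (ls : List (List Int)) : List (List Int) :=
  (ls.map (fun s => s.drop i)).filter (fun t => !t.isEmpty)

theorem drop_nil_iff (s : List Int) (i : Nat) : (s.drop i = []) ↔ s.length ≤ i := by
  simp [List.drop_eq_nil_iff]

-- A's per-column pass, fully characterised (remaining is unchanged: all appended slices are empty)
theorem aPass_eq (i : Nat) (ls : List (List Int)) (res rem : List Int) :
    aPass ls i res rem
      = (res ++ (ls.filterMap (fun s => if i < s.length then some (s.getD i 0) else none)),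
         rem,
         ls.any (fun s => decide (i < s.length))) := by
  unfold aPass
  have key : ∀ (t : List (List Int)) (r q : List Int) (hb : Bool),
      t.foldl (aStep i) (r, q, hb)
        = (r ++ (t.filterMap (fun s => if i < s.length then some (s.getD i 0) else none)),
           q, hb || t.any (fun s => decide (i < s.length))) := by
    intro t
    induction t with
    | nil => simp
    | cons s u ih =>
      intro r q hb
      rw [List.foldl_cons, List.filterMap_cons, List.any_cons]
      by_cases h : i < s.length
      · rw [show aStep i (r, q, hb) s = (r ++ [s.getD i 0], q, true) from by simp [aStep, h]]
        rw [ih, if_pos h]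
        simp [h, List.append_assoc]
      · have hd : s.drop i = [] := (drop_nil_iff s i).mpr (by omega)
        rw [show aStep i (r, q, hb) s = (r, q, hb) from by simp [aStep, h, hd]]
        rw [ih, if_neg h]
        simp [h]
  simpa using key ls res rem false

-- B's per-column pass, fully characterised
theorem bPass_eq (act : List (List Int)) (res : List Int) :
    bPass act res
      = (res ++ act.map (fun s => s.head?.getD 0),
         act.filterMap (fun s => if s.tail = [] then none else some s.tail)) := by
  unfold bPass
  have key : ∀ (t : List (List Int)) (r : List Int) (acc2 : List (List Int)),
      t.foldl bStep (r, acc2)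
        = (r ++ t.map (fun s => s.head?.getD 0),
           acc2 ++ t.filterMap (fun s => if s.tail = [] then none else some s.tail)) := by
    intro t
    induction t with
    | nil => simp
    | cons s u ih =>
      intro r acc2
      rw [List.foldl_cons, bStep_eq, List.map_cons, List.filterMap_cons]
      by_cases h : s.tail = []
      · rw [if_pos h, ih, if_pos h, List.append_assoc]
        simp
      · rw [if_neg h, ih, if_neg h, List.append_assoc, List.append_assoc, List.singleton_append]
        simp
  simpa using key act res []

-- the column A collects at index i = the heads of the active sublists
theorem row_eq (i : Nat) (ls : List (List Int)) :
    ls.filterMap (fun s => if i < s.length then some (s.getD i 0) else none)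
      = (actAt i ls).map (fun s => s.head?.getD 0) := by
  induction ls with
  | nil => simp [actAt]
  | cons s t ih =>
    unfold actAt at *
    rw [List.filterMap_cons, List.map_cons, List.filter_cons]
    by_cases h : i < s.length
    · have hne : (s.drop i).isEmpty = false := by
        rw [List.isEmpty_eq_false_iff, ne_eq, drop_nil_iff]; omega
      have hh : (s.drop i).head?.getD 0 = s.getD i 0 := by
        simp [List.head?_drop, List.getD_eq_getElem?_getD]
      rw [if_pos h, hne]
      simp only [Bool.not_false, if_pos]
      rw [List.map_cons, hh, ih]
    · have he : (s.drop i).isEmpty = true := by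
        rw [List.isEmpty_iff, drop_nil_iff]; omega
      rw [if_neg h, he]
      simp only [Bool.not_true, ih]
      simp

-- dropping heads of the active sublists yields the active sublists of the next column
theorem next_eq (i : Nat) (ls : List (List Int)) :
    (actAt i ls).filterMap (fun s => if s.tail = [] then none else some s.tail)
      = actAt (i + 1) ls := by
  induction ls with
  | nil => simp [actAt]
  | cons s t ih =>
    unfold actAt at *
    rw [List.map_cons, List.filter_cons, List.map_cons, List.filter_cons]
    have hdd : (s.drop i).tail = s.drop (i + 1) := by
      rw [List.tail_drop]
    by_cases h : (s.drop i).isEmpty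
    · have h1 : (s.drop (i + 1)).isEmpty = true := by
        rw [List.isEmpty_iff, drop_nil_iff]
        rw [List.isEmpty_iff, drop_nil_iff] at h
        omega
      rw [h, h1]
      simp only [Bool.not_true]
      simp [ih]
    · rw [Bool.not_eq_true] at h
      by_cases h2 : (s.drop (i + 1)).isEmpty
      · have ht : (s.drop i).tail = [] := by rw [hdd, ← List.isEmpty_iff]; exact h2
        simp [h, h2, ht, ih]
      · have h2' : (s.drop (i + 1)).isEmpty = false := by rwa [Bool.not_eq_true] at h2
        have ht : ¬ (s.drop i).tail = [] := by
          rw [hdd]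
          exact List.isEmpty_eq_false_iff.mp h2'
        have hl : ¬ s.length ≤ i + 1 := by
          rw [List.isEmpty_eq_false_iff, ne_eq, drop_nil_iff] at h2'
          omega
        simp [h, h2', hdd, ih, hl]

-- `has_elements` ↔ some sublist is still active
theorem has_iff (i : Nat) (ls : List (List Int)) :
    ls.any (fun s => decide (i < s.length)) = !(actAt i ls).isEmpty := by
  induction ls with
  | nil => simp [actAt]
  | cons s t ih =>
    unfold actAt at *
    rw [List.any_cons, List.map_cons, List.filter_cons]
    by_cases h : i < s.length
    · have hne : (s.drop i).isEmpty = false := by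
        rw [List.isEmpty_eq_false_iff, ne_eq, drop_nil_iff]; omega
      rw [hne]
      simp [h]
    · have he : (s.drop i).isEmpty = true := by
        rw [List.isEmpty_iff, drop_nil_iff]; omega
      rw [he]
      simp [h, ih]

-- no active sublist once i reaches the maximum length
theorem actAt_nil_of_ge (i : Nat) (ls : List (List Int)) (h : aMaxLen ls ≤ i) :
    actAt i ls = [] := by
  unfold actAt
  rw [List.filter_eq_nil_iff]
  intro t ht
  simp only [List.mem_map] at ht
  obtain ⟨s, hs, rfl⟩ := ht
  have := aMaxLen_ge ls s hs
  simp only [Bool.not_eq_true', Bool.not_eq_false, List.isEmpty_iff, drop_nil_iff]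
  omega

-- main loop invariant: A's loop from column i = B's loop on the active sublists at column i
theorem loop_base (ls : List (List Int)) (i : Nat) (res : List Int) (hact : actAt i ls = []) :
    aLoop ls i res [] = bLoop (actAt i ls) res := by
  have hhas : ls.any (fun s => decide (i < s.length)) = false := by
    rw [has_iff, hact]; rfl
  have hrow : ls.filterMap (fun s => if i < s.length then some (s.getD i 0) else none) = [] := by
    rw [row_eq, hact]; rfl
  rw [aLoop, dif_neg (by rw [aPass_eq]; simp [hhas]), aPass_eq, bLoop,
     if_pos (by rw [hact]; rfl), hrow]
  simp

theorem loop_eq (n : Nat) : ∀ (ls : List (List Int)) (i : Nat) (res : List Int),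
    aMaxLen ls ≤ i + n → aLoop ls i res [] = bLoop (actAt i ls) res := by
  induction n with
  | zero =>
    intro ls i res h
    exact loop_base ls i res (actAt_nil_of_ge i ls (by omega))
  | succ n ih =>
    intro ls i res h
    by_cases hact : (actAt i ls).isEmpty
    · exact loop_base ls i res (List.isEmpty_iff.mp hact)
    · have hact' : (actAt i ls).isEmpty = false := by rwa [Bool.not_eq_true] at hact
      have hhas : ls.any (fun s => decide (i < s.length)) = true := by
        rw [has_iff, hact']; rfl
      rw [aLoop, dif_pos (by rw [aPass_eq]; simpa using hhas)]
      rw [bLoop, if_neg (by simp [hact'])]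
      rw [aPass_eq]
      dsimp only
      rw [bPass_eq]
      dsimp only
      rw [row_eq, next_eq]
      exact ih ls (i + 1) _ (by omega)

-- ===== VERDICT (by name: the statement is the Claim_ definition above) =====
theorem interleave_lists_spec : Claim_equal_interleave_lists := by
  intro ls _
  unfold Spec_interleave_lists interleave_lists interleave_lists_alt
  have h0 : actAt 0 ls = ls.filter (fun s => !s.isEmpty) := by
    simp [actAt]
  rw [loop_eq (aMaxLen ls) ls 0 [] (by omega), h0]
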